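-- pv_equiv track=rewrite | github.com/pypi-data/pypi-mirror-361 | packages/autolei/autolei-1.0.2.250711-py3-none-any.whl/autolei/src/xds_input.py | generate_exclude_data_ranges
-- ===== SOURCE A (Python) =====
-- from typing import List, Dict
--
-- def generate_exclude_data_ranges(exclude_list: List[int]) -> List[str]:
--     """Generates EXCLUDE_DATA_RANGE lines for an XDS.INP file.
--
--     Args:
--         exclude_list (List[int]): List of excluded frame numbers.
--
--     Returns:
--         List[str]: Lines for the EXCLUDE_DATA_RANGE parameter.
--     """
--     add_lines = []
--     if exclude_list:
--         start = exclude_list[0]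
--         prev = start
--         for num in exclude_list[1:]:
--             if num != prev + 1:
--                 if start == prev:
--                     add_lines.append(f" EXCLUDE_DATA_RANGE= {start} {start}\n")
--                 else:
--                     add_lines.append(f" EXCLUDE_DATA_RANGE= {start} {prev}\n")
--                 start = num
--             prev = num
--         if start == prev:
--             add_lines.append(f" EXCLUDE_DATA_RANGE= {start} {start}\n")
--         else:
--             add_lines.append(f" EXCLUDE_DATA_RANGE= {start} {prev}\n")
--     return add_lines
-- ===== SOURCE B (Python) =====
-- from typing import List
--
-- def generate_exclude_data_ranges(exclude_list: List[int]) -> List[str]: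
--     # Boundary detection: a run STARTS at the first element and after every break
--     # (pair (a, b) of adjacent elements with b != a + 1); a run ENDS at every break
--     # and at the last element. Pair starts with ends positionally and format.
--     if not exclude_list:
--         return []
--     breaks = [(a, b) for a, b in zip(exclude_list, exclude_list[1:]) if b != a + 1]
--     starts = [exclude_list[0]] + [b for a, b in breaks]
--     ends = [a for a, b in breaks] + [exclude_list[-1]]
--     return [f" EXCLUDE_DATA_RANGE= {s} {e}\n" for s, e in zip(starts, ends)]
-- ===== Notes on version B (the rewrite author's own statement) =====
-- stated objective: alternative
-- what changed: Replaced A's stateful single loop (start/prev registers with duplicated emit branches) by stateless boundary detection: filter the zipped adjacent-pair list for breaks, derive the starts and ends lists from the breaks, and zip them into the formatted lines.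
import Mathlib
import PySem

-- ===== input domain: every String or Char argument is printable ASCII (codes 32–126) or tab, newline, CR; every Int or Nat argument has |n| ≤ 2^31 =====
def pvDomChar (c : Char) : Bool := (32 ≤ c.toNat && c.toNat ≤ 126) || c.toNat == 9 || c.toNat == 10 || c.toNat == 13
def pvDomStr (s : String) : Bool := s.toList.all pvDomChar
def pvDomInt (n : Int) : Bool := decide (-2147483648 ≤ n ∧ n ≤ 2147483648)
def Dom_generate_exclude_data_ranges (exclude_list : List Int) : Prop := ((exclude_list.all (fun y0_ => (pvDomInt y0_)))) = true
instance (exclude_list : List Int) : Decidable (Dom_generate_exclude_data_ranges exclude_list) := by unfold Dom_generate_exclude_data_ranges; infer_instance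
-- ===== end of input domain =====

-- B replaces A's stateful loop by stateless boundary detection (filter adjacent pairs
-- for breaks, derive starts/ends, zip and format); same return value, proved equal.

-- shared string formatter (the f-string both programs produce)
def pvFmt (a b : Int) : String :=
  " EXCLUDE_DATA_RANGE= " ++ PySem.Int.toStr a ++ " " ++ PySem.Int.toStr b ++ "\n"

-- ===== PORT A =====
-- A's loop over exclude_list[1:] carrying (start, prev, add_lines)
def pvLoopA (start prev : Int) (acc : List String) : List Int → List String
  | [] =>
      if start = prev then acc ++ [pvFmt start start]
      else acc ++ [pvFmt start prev]
  | num :: rest =>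
      if num ≠ prev + 1 then
        if start = prev then pvLoopA num num (acc ++ [pvFmt start start]) rest
        else pvLoopA num num (acc ++ [pvFmt start prev]) rest
      else pvLoopA start num acc rest

def generate_exclude_data_ranges (exclude_list : List Int) : List String :=
  match exclude_list with
  | [] => []
  | x :: rest => pvLoopA x x [] rest

-- ===== PORT B =====
-- breaks = adjacent pairs (a, b) with b ≠ a + 1; starts = first element plus the
-- second components of the breaks; ends = first components of the breaks plus the
-- last element; zip starts with ends and format.
def generate_exclude_data_ranges_alt (exclude_list : List Int) : List String :=
  match exclude_list with
  | [] => []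
  | x :: _ =>
      let breaks := (exclude_list.zip exclude_list.tail).filter (fun p => p.2 ≠ p.1 + 1)
      let starts := x :: breaks.map Prod.snd
      let ends := breaks.map Prod.fst ++ [exclude_list.getLast!]
      (starts.zip ends).map (fun p => pvFmt p.1 p.2)

-- ===== PRECONDITION & SPEC =====
def Spec_generate_exclude_data_ranges (exclude_list : List Int) (out : List String) : Prop := out = generate_exclude_data_ranges_alt exclude_list
instance (exclude_list : List Int) (out : List String) : Decidable (Spec_generate_exclude_data_ranges exclude_list out) := by unfold Spec_generate_exclude_data_ranges; infer_instance

-- ===== CLAIM (what is proved, stated in full; the proofs are below) =====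
def Claim_equal_generate_exclude_data_ranges : Prop := ∀ (exclude_list : List Int), Dom_generate_exclude_data_ranges exclude_list → Spec_generate_exclude_data_ranges exclude_list (generate_exclude_data_ranges exclude_list)

-- ===== LEMMAS AND PROOFS =====

-- B's pipeline, applied to the suffix prev :: rest with pending run start `start`
def pvTailB (start prev : Int) (rest : List Int) : List String :=
  let breaks := ((prev :: rest).zip rest).filter (fun p => p.2 ≠ p.1 + 1)
  ((start :: breaks.map Prod.snd).zip (breaks.map Prod.fst ++ [(prev :: rest).getLast!])).map
    (fun p => pvFmt p.1 p.2)

lemma pvLoopA_eq (rest : List Int) (start prev : Int) (acc : List String) :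
    pvLoopA start prev acc rest = acc ++ pvTailB start prev rest := by
  induction rest generalizing start prev acc with
  | nil =>
      simp only [pvLoopA, pvTailB, List.zip_nil_right, List.filter_nil, List.map_nil,
        List.nil_append,   List.zip_cons_cons, List.zip_nil_right,
        List.map_cons]
      split
      · next h => rw [h]; rfl
      · rfl
  | cons n t ih =>
      by_cases hc : n = prev + 1
      · have h1 : pvLoopA start prev acc (n :: t) = pvLoopA start n acc t := by
          simp [pvLoopA, hc]
        rw [h1, ih]
        simp [pvTailB, hc]
      · have h1 : pvLoopA start prev acc (n :: t) = pvLoopA n n (acc ++ [pvFmt start prev]) t := by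
          simp only [pvLoopA, if_pos hc]
          split
          · next h => rw [h]
          · rfl
        rw [h1, ih]
        simp [pvTailB, hc]

-- ===== VERDICT (by name: the statement is the Claim_ definition above) =====
theorem generate_exclude_data_ranges_spec : Claim_equal_generate_exclude_data_ranges := by
  intro xs _
  unfold Spec_generate_exclude_data_ranges
  match xs with
  | [] => rfl
  | x :: rest =>
      show pvLoopA x x [] rest = _
      rw [pvLoopA_eq]
      rfl
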